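-- pv_equiv track=rewrite | github.com/sagemath/sage-archive-2023-02-01 | src/sage/algebras/commutative_dga.py | exterior_algebra_basis
-- ===== SOURCE A (Python) =====
-- def exterior_algebra_basis(n, degrees):
--     """
--     Basis of an exterior algebra in degree ``n``, where the
--     generators are in degrees ``degrees``.
--
--     INPUT:
--
--     - ``n`` - integer
--     - ``degrees`` - iterable of integers
--
--     Return list of lists, each list representing exponents for the
--     corresponding generators. (So each list consists of 0's and 1's.)
--
--     EXAMPLES::
--
--         sage: from sage.algebras.commutative_dga import exterior_algebra_basis
--         sage: exterior_algebra_basis(1, (1,3,1))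
--         [[0, 0, 1], [1, 0, 0]]
--         sage: exterior_algebra_basis(4, (1,3,1))
--         [[0, 1, 1], [1, 1, 0]]
--         sage: exterior_algebra_basis(10, (1,5,1,1))
--         []
--     """
--     zeroes = [0]*len(degrees)
--     if not degrees:
--         if n == 0:
--             return [zeroes]
--         else:
--             return []
--     if len(degrees) == 1:
--         if n == degrees[0]:
--             return [[1]]
--         elif n == 0:
--             return [zeroes]
--         else:
--             return []
--     result = [[0] + v for
--               v in exterior_algebra_basis(n, degrees[1:])]
--     if n == 0 and zeroes not in result:
--         result += [zeroes]
--     d = degrees[0]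
--     return result + [[1] + v for
--                      v in exterior_algebra_basis(n-d, degrees[1:])]
-- ===== SOURCE B (Python) =====
-- def exterior_algebra_basis(n, degrees):
--     """Memoized top-down DP on (suffix index, remaining degree): each distinct
--     subproblem is solved once, instead of A's plain recursion re-solving them."""
--     degrees = list(degrees)
--     L = len(degrees)
--     memo = {}
--
--     def basis(i, m):
--         # basis vectors (length L - i) for generators degrees[i:] with degree-sum m
--         key = (i, m)
--         if key in memo:
--             return memo[key]
--         if i >= L:
--             res = [[]] if m == 0 else []
--         elif i == L - 1:
--             if m == degrees[i]:
--                 res = [[1]]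
--             elif m == 0:
--                 res = [[0]]
--             else:
--                 res = []
--         else:
--             res = [[0] + v for v in basis(i + 1, m)]
--             zeroes = [0] * (L - i)
--             if m == 0 and zeroes not in res:
--                 res = res + [zeroes]
--             res = res + [[1] + v for v in basis(i + 1, m - degrees[i])]
--         memo[key] = res
--         return res
--
--     return basis(0, n)
-- ===== Notes on version B (the rewrite author's own statement) =====
-- stated objective: alternative
-- what changed: Replaces A's plain recursion (which re-solves the same suffix subproblems repeatedly, exponentially often) by a top-down dynamic program memoized on (suffix index, remaining degree), solving each distinct subproblem once; no speed claim: at large sizes the exponential output size dominates both.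
import Mathlib
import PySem

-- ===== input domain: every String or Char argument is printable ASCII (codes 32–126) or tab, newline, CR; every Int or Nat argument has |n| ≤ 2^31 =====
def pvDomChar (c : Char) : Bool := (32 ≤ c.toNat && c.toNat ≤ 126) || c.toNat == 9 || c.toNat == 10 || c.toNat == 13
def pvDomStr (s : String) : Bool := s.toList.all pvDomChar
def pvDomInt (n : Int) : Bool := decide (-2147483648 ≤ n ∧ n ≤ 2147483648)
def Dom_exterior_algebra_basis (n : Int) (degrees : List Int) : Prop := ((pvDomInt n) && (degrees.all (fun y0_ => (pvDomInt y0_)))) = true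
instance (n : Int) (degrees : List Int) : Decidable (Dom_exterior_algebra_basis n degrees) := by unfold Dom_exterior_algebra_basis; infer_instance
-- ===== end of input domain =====

-- B: memoized DP on (suffix index, remaining degree) instead of A's plain recursion; each distinct subproblem solved once (alternative decomposition; no speed claim: at large sizes the exponential output size dominates both).

-- ===== PORT A =====
def exterior_algebra_basis (n : Int) (degrees : List Int) : List (List Int) :=
  let zeroes : List Int := List.replicate degrees.length 0
  match degrees with
  | [] => if n = 0 then [zeroes] else []
  | [d] => if n = d then [[1]] else if n = 0 then [zeroes] else []
  | d :: rest =>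
      let result := (exterior_algebra_basis n rest).map (fun v => 0 :: v)
      let result := if n = 0 ∧ zeroes ∉ result then result ++ [zeroes] else result
      result ++ (exterior_algebra_basis (n - d) rest).map (fun v => 1 :: v)

-- ===== PORT B =====
-- `basis(i, m)` of Source B, with the memo dict threaded through explicitly.
def ealtBasis (degrees : List Int) (L : Nat) (i : Nat) (m : Int)
    (memo : PySem.Dict (Int × Int) (List (List Int))) :
    List (List Int) × PySem.Dict (Int × Int) (List (List Int)) :=
  match memo.get? ((i : Int), m) with
  | some v => (v, memo)
  | none =>
    if _h : L ≤ i then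
      let res : List (List Int) := if m = 0 then [[]] else []
      (res, memo.insert ((i : Int), m) res)
    else if i = L - 1 then
      -- degrees[i]; always in range here since i < L = len(degrees)
      let d := (PySem.List.pyGet? degrees (i : Int)).getD 0
      let res : List (List Int) := if m = d then [[1]] else if m = 0 then [[0]] else []
      (res, memo.insert ((i : Int), m) res)
    else
      let p1 := ealtBasis degrees L (i + 1) m memo
      let res1 := p1.1.map (fun v => 0 :: v)
      let zeroes : List Int := List.replicate (L - i) 0
      let res2 := if m = 0 ∧ zeroes ∉ res1 then res1 ++ [zeroes] else res1
      let d := (PySem.List.pyGet? degrees (i : Int)).getD 0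
      let p2 := ealtBasis degrees L (i + 1) (m - d) p1.2
      let res := res2 ++ p2.1.map (fun v => 1 :: v)
      (res, p2.2.insert ((i : Int), m) res)
termination_by L - i
decreasing_by all_goals omega

def exterior_algebra_basis_alt (n : Int) (degrees : List Int) : List (List Int) :=
  (ealtBasis degrees degrees.length 0 n PySem.Dict.empty).1

-- ===== PRECONDITION & SPEC =====
def Spec_exterior_algebra_basis (n : Int) (degrees : List Int) (out : List (List Int)) : Prop := out = exterior_algebra_basis_alt n degrees
instance (n : Int) (degrees : List Int) (out : List (List Int)) : Decidable (Spec_exterior_algebra_basis n degrees out) := by unfold Spec_exterior_algebra_basis; infer_instance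

-- ===== CLAIM (what is proved, stated in full; the proofs are below) =====
def Claim_equal_exterior_algebra_basis : Prop := ∀ (n : Int) (degrees : List Int), Dom_exterior_algebra_basis n degrees → Spec_exterior_algebra_basis n degrees (exterior_algebra_basis n degrees)

-- ===== LEMMAS AND PROOFS =====

-- memo invariant: every cached entry (j, m) holds A's value on the suffix from j
def EabInv (degrees : List Int) (memo : PySem.Dict (Int × Int) (List (List Int))) : Prop :=
  ∀ (j : Nat) (m : Int) (v : List (List Int)),
    memo.get? ((j : Int), m) = some v → v = exterior_algebra_basis m (degrees.drop j)

theorem eab_nil (m : Int) : exterior_algebra_basis m [] = if m = 0 then [[]] else [] := by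
  simp [exterior_algebra_basis]

theorem eab_single (m d : Int) :
    exterior_algebra_basis m [d] = if m = d then [[1]] else if m = 0 then [[0]] else [] := by
  simp [exterior_algebra_basis]

theorem eab_cons (m d e : Int) (rest : List Int) :
    exterior_algebra_basis m (d :: e :: rest) =
      (let result := (exterior_algebra_basis m (e :: rest)).map (fun v => (0:Int) :: v);
       let result := if m = 0 ∧ (List.replicate (rest.length + 2) (0:Int)) ∉ result then result ++ [List.replicate (rest.length + 2) (0:Int)] else result;
       result ++ (exterior_algebra_basis (m - d) (e :: rest)).map (fun v => (1:Int) :: v)) := by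
  simp only [exterior_algebra_basis, List.length_cons]

theorem EabInv_insert (degrees : List Int) (memo : PySem.Dict (Int × Int) (List (List Int)))
    (i : Nat) (m : Int) (res : List (List Int))
    (hinv : EabInv degrees memo) (hres : res = exterior_algebra_basis m (degrees.drop i)) :
    EabInv degrees (memo.insert ((i : Int), m) res) := by
  intro j m' v hv
  rw [PySem.Dict.get?_insert] at hv
  split at hv
  · rename_i heq
    have hj : j = i := by
      have h' := congrArg Prod.fst heq; simp at h'; exact_mod_cast h'
    have hm : m' = m := by simpa using congrArg Prod.snd heq
    cases hv
    subst hj hm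
    exact hres
  · exact hinv j m' v hv

theorem ealtBasis_correct (degrees : List Int) :
    ∀ (k i : Nat) (m : Int) (memo : PySem.Dict (Int × Int) (List (List Int))),
      degrees.length - i ≤ k → EabInv degrees memo →
      (ealtBasis degrees degrees.length i m memo).1 = exterior_algebra_basis m (degrees.drop i)
        ∧ EabInv degrees (ealtBasis degrees degrees.length i m memo).2 := by
  intro k
  induction k with
  | zero =>
    intro i m memo hk hinv
    rw [ealtBasis]
    cases hg : memo.get? ((i : Int), m) with
    | some v => exact ⟨hinv i m v hg, hinv⟩
    | none =>
      have hLi : degrees.length ≤ i := by omega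
      simp only [dif_pos hLi]
      rw [List.drop_eq_nil_of_le hLi, eab_nil]
      exact ⟨rfl, EabInv_insert degrees memo i m _ hinv (by rw [List.drop_eq_nil_of_le hLi, eab_nil])⟩
  | succ k ih =>
    intro i m memo hk hinv
    rw [ealtBasis]
    cases hg : memo.get? ((i : Int), m) with
    | some v => exact ⟨hinv i m v hg, hinv⟩
    | none =>
      by_cases hLi : degrees.length ≤ i
      · simp only [dif_pos hLi]
        rw [List.drop_eq_nil_of_le hLi, eab_nil]
        exact ⟨rfl, EabInv_insert degrees memo i m _ hinv (by rw [List.drop_eq_nil_of_le hLi, eab_nil])⟩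
      · simp only [dif_neg hLi]
        have hi : i < degrees.length := by omega
        have hdropi : degrees.drop i = degrees[i] :: degrees.drop (i + 1) :=
          List.drop_eq_getElem_cons hi
        have hd : (PySem.List.pyGet? degrees ((i : Nat) : Int)).getD 0 = degrees[i] := by
          simp [PySem.List.pyGet?_natCast, List.getElem?_eq_getElem hi]
        by_cases hlast : i = degrees.length - 1
        · simp only [if_pos hlast]
          have hdrop1 : degrees.drop (i + 1) = [] :=
            List.drop_eq_nil_of_le (by omega)
          refine ⟨?_, EabInv_insert degrees memo i m _ hinv ?_⟩ <;>
            simp only [hdropi, hdrop1, eab_single, hd]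
        · simp only [if_neg hlast]
          have hi1 : i + 1 < degrees.length := by omega
          obtain ⟨h1, hinv1⟩ := ih (i + 1) m memo (by omega) hinv
          obtain ⟨h2, hinv2⟩ := ih (i + 1) (m - (PySem.List.pyGet? degrees ((i : Nat) : Int)).getD 0)
            (ealtBasis degrees degrees.length (i + 1) m memo).2 (by omega) hinv1
          have hdropi1 : degrees.drop (i + 1) = degrees[i + 1] :: degrees.drop (i + 2) :=
            List.drop_eq_getElem_cons hi1
          have hlen : degrees.length - i = (degrees.drop (i + 2)).length + 2 := by
            rw [List.length_drop]; omega
          rw [hd] at h2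
          constructor
          · simp only [h1, hd]
            rw [hdropi, hdropi1, eab_cons, ← hdropi1, hlen]
            simp only [h2]
          · refine EabInv_insert degrees _ i m _ hinv2 ?_
            simp only [h1, hd]
            rw [hdropi, hdropi1, eab_cons, ← hdropi1, hlen]
            simp only [h2]

-- ===== VERDICT (by name: the statement is the Claim_ definition above) =====
theorem exterior_algebra_basis_spec : Claim_equal_exterior_algebra_basis := by
  intro n degrees _
  unfold Spec_exterior_algebra_basis exterior_algebra_basis_alt
  have h := (ealtBasis_correct degrees degrees.length 0 n PySem.Dict.empty (by omega)
    (by intro j m v hv; simp [PySem.Dict.get?_empty] at hv)).1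
  simp at h
  exact h.symm
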